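-- pv_equiv track=rewrite | github.com/partha117/New_Data_Set | utils.py | get_cost_array
-- ===== SOURCE A (Python) =====
-- cost_function = {"method": 1, "class": 0, "interface": 0, "new_line": 2}
--
-- def get_cost_array(text, class_list, interface_list, method_list):
--     line_list = [item + 1 for item in range(len(text.split("\n")))]
--     temp = sorted(class_list + interface_list + method_list + line_list)
--     array = []
--     for item in temp:
--         if item in class_list:
--             array.append((item, cost_function['class']))
--         elif item in interface_list:
--             array.append((item, cost_function['interface']))
--         elif item in method_list:
--             array.append((item, cost_function['method']))
--         elif item in line_list:
--             array.append((item, cost_function['new_line']))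
--     return array
-- ===== SOURCE B (Python) =====
-- def get_cost_array(text, class_list, interface_list, method_list):
--     # Tag each number with its source cost at the source, sort the tagged pairs
--     # lexicographically, then one streaming pass gives every member of a run of
--     # equal numbers the run's first (= smallest = highest-priority) cost.
--     n = len(text.split("\n"))
--     tagged = ([(x, 0) for x in class_list]
--               + [(x, 0) for x in interface_list]
--               + [(x, 1) for x in method_list]
--               + [(i, 2) for i in range(1, n + 1)])
--     tagged.sort()
--     out = []
--     run_value = None
--     run_cost = None
--     for v, c in tagged:
--         if v != run_value:
--             run_value, run_cost = v, c
--         out.append((v, run_cost))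
--     return out
-- ===== Notes on version B (the rewrite author's own statement) =====
-- stated objective: faster
-- what changed: Instead of sorting the bare numbers and re-deciding each one's category by four membership scans, B tags every number with its source cost up front, sorts the tagged pairs lexicographically, and a single streaming pass propagates the first (minimal, i.e. highest-priority) cost of each run of equal numbers.
import Mathlib
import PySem

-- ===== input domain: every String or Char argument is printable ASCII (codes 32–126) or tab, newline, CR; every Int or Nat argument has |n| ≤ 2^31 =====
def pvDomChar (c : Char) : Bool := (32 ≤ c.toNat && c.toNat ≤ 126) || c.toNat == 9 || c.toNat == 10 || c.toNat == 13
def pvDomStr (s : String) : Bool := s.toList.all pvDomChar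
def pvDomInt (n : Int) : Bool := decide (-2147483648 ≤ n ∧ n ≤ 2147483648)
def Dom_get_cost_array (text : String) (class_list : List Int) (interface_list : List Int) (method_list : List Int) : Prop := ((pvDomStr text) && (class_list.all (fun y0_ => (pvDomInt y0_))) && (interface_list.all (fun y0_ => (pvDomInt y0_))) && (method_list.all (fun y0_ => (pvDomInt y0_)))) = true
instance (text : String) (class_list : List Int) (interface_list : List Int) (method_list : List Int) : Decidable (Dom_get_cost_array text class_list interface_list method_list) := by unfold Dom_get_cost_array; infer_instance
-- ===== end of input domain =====

-- B tags each number with its source cost, sorts the tagged pairs once, and labels runs of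
-- equal numbers with the run's first cost in one streaming pass (objective: faster).

def costFunction : PySem.Dict String Int :=
  PySem.Dict.ofList [("method", 1), ("class", 0), ("interface", 0), ("new_line", 2)]

-- ===== PORT A =====
-- cost_function['k'] is ported as costFunction.getD "k" 0: every key used is present, so the
-- KeyError branch of Python's lookup is unreachable and the default is never consulted.
def get_cost_array (text : String) (class_list : List Int) (interface_list : List Int) (method_list : List Int) : List (Int × Int) :=
  let line_list := (PySem.List.pyRange 0 (((PySem.Chars.splitOn text.toList "\n".toList).length : Int)) 1).map (fun item => item + 1)
  let temp := PySem.List.sorted (class_list ++ interface_list ++ method_list ++ line_list) (fun x => x) false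
  temp.foldl (fun array item =>
    if class_list.contains item then array ++ [(item, costFunction.getD "class" 0)]
    else if interface_list.contains item then array ++ [(item, costFunction.getD "interface" 0)]
    else if method_list.contains item then array ++ [(item, costFunction.getD "method" 0)]
    else if line_list.contains item then array ++ [(item, costFunction.getD "new_line" 0)]
    else array) []

-- ===== PORT B =====
-- Python's `run_value = None; run_cost = None` pair-of-registers is ported as an
-- Option (Int × Int) state (none = nothing seen yet); `v != run_value` with run_value = None
-- is always true for an int, which the `none` branch reproduces.
def get_cost_array_alt (text : String) (class_list : List Int) (interface_list : List Int) (method_list : List Int) : List (Int × Int) :=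
  let n : Int := ((PySem.Chars.splitOn text.toList "\n".toList).length : Int)
  let tagged := class_list.map (fun x => (x, (0 : Int)))
      ++ interface_list.map (fun x => (x, (0 : Int)))
      ++ method_list.map (fun x => (x, (1 : Int)))
      ++ (PySem.List.pyRange 1 (n + 1) 1).map (fun i => (i, (2 : Int)))
  let sortedT := PySem.List.sorted2 tagged (fun p => p.1) (fun p => p.2) false
  (sortedT.foldl (fun (st : Option (Int × Int) × List (Int × Int)) p =>
      let run : Int × Int := match st.1 with
        | some (rv, rc) => if p.1 ≠ rv then (p.1, p.2) else (rv, rc)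
        | none => (p.1, p.2)
      (some run, st.2 ++ [(p.1, run.2)])) (none, [])).2

-- ===== PRECONDITION & SPEC =====
def Spec_get_cost_array (text : String) (class_list : List Int) (interface_list : List Int) (method_list : List Int) (out : List (Int × Int)) : Prop := out = get_cost_array_alt text class_list interface_list method_list
instance (text : String) (class_list : List Int) (interface_list : List Int) (method_list : List Int) (out : List (Int × Int)) : Decidable (Spec_get_cost_array text class_list interface_list method_list out) := by unfold Spec_get_cost_array; infer_instance

-- ===== CLAIM (what is proved, stated in full; the proofs are below) =====
def Claim_equal_get_cost_array : Prop := ∀ (text : String) (class_list : List Int) (interface_list : List Int) (method_list : List Int), Dom_get_cost_array text class_list interface_list method_list → Spec_get_cost_array text class_list interface_list method_list (get_cost_array text class_list interface_list method_list)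

-- ===== LEMMAS AND PROOFS =====

theorem cf_class : costFunction.getD "class" 0 = 0 := by decide
theorem cf_interface : costFunction.getD "interface" 0 = 0 := by decide
theorem cf_method : costFunction.getD "method" 0 = 1 := by decide
theorem cf_newline : costFunction.getD "new_line" 0 = 2 := by decide

-- the priority cost A assigns to a value
def prioC (C I M : List Int) (v : Int) : Int :=
  if v ∈ C then 0 else if v ∈ I then 0 else if v ∈ M then 1 else 2

-- A's line_list equals B's range(1, n+1)
theorem line_list_shift (n : Nat) :
    (PySem.List.pyRange 0 (n : Int) 1).map (fun item => item + 1)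
      = PySem.List.pyRange 1 ((n : Int) + 1) 1 := by
  rw [PySem.List.pyRange_one, PySem.List.pyRange_one]
  simp only [List.map_map]
  have : ((n : Int) - 0).toNat = ((n : Int) + 1 - 1).toNat := by omega
  rw [this]
  apply List.map_congr_left
  intro k _
  simp; ring

-- A's loop, on a list whose every element lies in one of the four lists, appends one labelled pair per element
theorem foldA (C I M L : List Int) (l : List Int) (acc : List (Int × Int))
    (h : ∀ x ∈ l, x ∈ C ∨ x ∈ I ∨ x ∈ M ∨ x ∈ L) :
    l.foldl (fun array item =>
      if C.contains item then array ++ [(item, (0:Int))]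
      else if I.contains item then array ++ [(item, 0)]
      else if M.contains item then array ++ [(item, 1)]
      else if L.contains item then array ++ [(item, 2)]
      else array) acc
    = acc ++ l.map (fun item => (item, prioC C I M item)) := by
  induction l generalizing acc with
  | nil => simp
  | cons a t ih =>
    have ha := h a (List.mem_cons_self ..)
    simp only [List.foldl_cons, List.map_cons]
    rw [ih _ (fun x hx => h x (List.mem_cons_of_mem _ hx))]
    simp only [List.contains_eq_mem, prioC]
    by_cases h1 : a ∈ C <;> by_cases h2 : a ∈ I <;> by_cases h3 : a ∈ M <;> by_cases h4 : a ∈ L <;>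
      simp [h1, h2, h3, h4] <;> tauto

-- the strict lexicographic comparator B's sort uses, and the reflexive order it produces
def lexLt (p q : Int × Int) : Bool :=
  decide (p.1 < q.1) || (!decide (q.1 < p.1) && decide (p.2 < q.2))

def lexLe (p q : Int × Int) : Prop :=
  p.1 < q.1 ∨ (p.1 = q.1 ∧ p.2 ≤ q.2)

theorem lexLt_false_iff (p q : Int × Int) : lexLt q p = false ↔ lexLe p q := by
  simp [lexLt, lexLe]; omega

theorem lexLe_trans {p q r : Int × Int} (h1 : lexLe p q) (h2 : lexLe q r) : lexLe p r := by
  simp [lexLe] at *; omega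

theorem lexLt_asym {p q : Int × Int} (h : lexLt p q = true) : lexLe p q := by
  rw [← lexLt_false_iff]; simp [lexLt] at *; omega

-- inserting into a lexLe-pairwise list keeps it lexLe-pairwise
theorem insertBy_lex_pairwise (x : Int × Int) (l : List (Int × Int))
    (hl : l.Pairwise lexLe) :
    (PySem.List.insertBy lexLt x l).Pairwise lexLe := by
  induction l with
  | nil => simp [PySem.List.insertBy]
  | cons y ys ih =>
    rw [List.pairwise_cons] at hl
    by_cases h : lexLt x y = true
    · simp only [PySem.List.insertBy, h, if_pos]
      refine List.pairwise_cons.2 ⟨?_, List.pairwise_cons.2 ⟨hl.1, hl.2⟩⟩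
      intro z hz
      rcases List.mem_cons.1 hz with rfl | hz'
      · exact lexLt_asym h
      · exact lexLe_trans (lexLt_asym h) (hl.1 z hz')
    · simp only [PySem.List.insertBy, h, if_neg, Bool.not_eq_true]
      refine List.pairwise_cons.2 ⟨?_, ih hl.2⟩
      intro z hz
      rcases (PySem.List.mem_insertBy _ _ _ _).1 hz with rfl | hz'
      · exact (lexLt_false_iff y z).1 (Bool.not_eq_true _ ▸ (by simpa using h))
      · exact hl.1 z hz'

theorem foldl_insertBy_lex_pairwise (l : List (Int × Int)) (acc : List (Int × Int))
    (hacc : acc.Pairwise lexLe) :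
    (l.foldl (fun acc x => PySem.List.insertBy lexLt x acc) acc).Pairwise lexLe := by
  induction l generalizing acc with
  | nil => simpa
  | cons a t ih => exact ih _ (insertBy_lex_pairwise a acc hacc)

theorem sorted2_lex_pairwise (l : List (Int × Int)) :
    (PySem.List.sorted2 l (fun p => p.1) (fun p => p.2) false).Pairwise lexLe := by
  have : PySem.List.sorted2 l (fun p : Int × Int => p.1) (fun p => p.2) false
      = l.foldl (fun acc x => PySem.List.insertBy lexLt x acc) [] := rfl
  rw [this]
  exact foldl_insertBy_lex_pairwise l [] (by simp)

-- B's streaming pass over a lex-sorted list of tagged pairs emits the priority cost of every value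
theorem foldB (pr : Int → Int) (l : List (Int × Int)) (run : Option (Int × Int)) (out : List (Int × Int))
    (hsort : l.Pairwise lexLe)
    (hlb : ∀ p ∈ l, pr p.1 ≤ p.2)
    (hmin : ∀ p ∈ l, (∀ rv rc, run = some (rv, rc) → p.1 ≠ rv) → (p.1, pr p.1) ∈ l)
    (hrun : ∀ rv rc, run = some (rv, rc) → rc = pr rv)
    (hge : ∀ p ∈ l, ∀ rv rc, run = some (rv, rc) → rv ≤ p.1) :
    (l.foldl (fun (st : Option (Int × Int) × List (Int × Int)) p =>
      let r : Int × Int := match st.1 with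
        | some (rv, rc) => if p.1 ≠ rv then (p.1, p.2) else (rv, rc)
        | none => (p.1, p.2)
      (some r, st.2 ++ [(p.1, r.2)])) (run, out)).2
    = out ++ l.map (fun p => (p.1, pr p.1)) := by
  induction l generalizing run out with
  | nil => simp
  | cons p t ih =>
    obtain ⟨v, c⟩ := p
    rw [List.pairwise_cons] at hsort
    -- whether the head starts a new run
    have hnew : (∀ rv rc, run = some (rv, rc) → v ≠ rv) → c = pr v := by
      intro hne
      have hmem : (v, pr v) ∈ (v, c) :: t := hmin (v, c) (List.mem_cons_self ..) hne
      rcases List.mem_cons.1 hmem with heq | hmem'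
      · exact (congrArg Prod.snd heq).symm
      · have h1 : lexLe (v, c) (v, pr v) := hsort.1 _ hmem'
        have h2 : pr v ≤ c := hlb (v, c) (List.mem_cons_self ..)
        simp [lexLe] at h1
        omega
    have htail_lb : ∀ q ∈ t, pr q.1 ≤ q.2 := fun q hq => hlb q (List.mem_cons_of_mem _ hq)
    have htail_ge : ∀ q ∈ t, (v : Int) ≤ q.1 := by
      intro q hq
      rcases hsort.1 q hq with h | ⟨h, _⟩ <;> omega
    match run with
    | none =>
        have hc : c = pr v := hnew (by simp)
        simp only [List.foldl_cons, List.map_cons]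
        rw [ih (some (v, c)) _ hsort.2 htail_lb
          (fun q hq hne => by
            have hm : (q.1, pr q.1) ∈ (v, c) :: t :=
              hmin q (List.mem_cons_of_mem _ hq) (by simp)
            rcases List.mem_cons.1 hm with heq | h'
            · exact absurd (congrArg Prod.fst heq) (hne v c rfl)
            · exact h')
          (fun rv rc h => by cases h; exact hc)
          (fun q hq a b h => by cases h; exact htail_ge q hq)]
        simp [hc]
    | some (rv, rc) =>
        by_cases hvr : v = rv
        · subst hvr
          have hc : rc = pr v := hrun v rc rfl
          simp only [List.foldl_cons, List.map_cons,
            if_neg (show ¬ v ≠ v from fun h => h rfl)]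
          rw [ih (some (v, rc)) _ hsort.2 htail_lb
            (fun q hq hne => by
              have hm : (q.1, pr q.1) ∈ (v, c) :: t :=
                hmin q (List.mem_cons_of_mem _ hq) (fun a b h => by cases h; exact hne v rc rfl)
              rcases List.mem_cons.1 hm with heq | h'
              · exact absurd (congrArg Prod.fst heq) (hne v rc rfl)
              · exact h')
            (fun a b h => by cases h; exact hc)
            (fun q hq a b h => by cases h; exact htail_ge q hq)]
          simp [hc]
        · have hc : c = pr v := hnew (fun a b h => by cases h; exact hvr)
          have hrv_lt : rv < v :=
            lt_of_le_of_ne (hge (v, c) (List.mem_cons_self ..) rv rc rfl) (Ne.symm hvr)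
          simp only [List.foldl_cons, List.map_cons, if_pos (show (v, c).1 ≠ rv from hvr)]
          rw [ih (some (v, c)) _ hsort.2 htail_lb
            (fun q hq hne => by
              have hm : (q.1, pr q.1) ∈ (v, c) :: t :=
                hmin q (List.mem_cons_of_mem _ hq)
                  (fun a b h => by cases h; have := htail_ge q hq; omega)
              rcases List.mem_cons.1 hm with heq | h'
              · exact absurd (congrArg Prod.fst heq) (hne v c rfl)
              · exact h')
            (fun a b h => by cases h; exact hc)
            (fun q hq a b h => by cases h; exact htail_ge q hq)]
          simp [hc]

theorem get_cost_array_spec_aux (text : String) (C I M : List Int) :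
    get_cost_array text C I M = get_cost_array_alt text C I M := by
  unfold get_cost_array get_cost_array_alt
  rw [line_list_shift]
  simp only [cf_class, cf_interface, cf_method, cf_newline]
  set n : Int := ((PySem.Chars.splitOn text.toList "\n".toList).length : Int) with hn
  set L := PySem.List.pyRange 1 (n + 1) 1 with hL
  set tagged := C.map (fun x => (x, (0 : Int)))
      ++ I.map (fun x => (x, (0 : Int)))
      ++ M.map (fun x => (x, (1 : Int)))
      ++ L.map (fun i => (i, (2 : Int))) with htag
  set sortedT := PySem.List.sorted2 tagged (fun p => p.1) (fun p => p.2) false with hsT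
  set vals := C ++ I ++ M ++ L with hvals
  have hmemT : ∀ p ∈ sortedT, p ∈ tagged := fun p hp =>
    ((PySem.List.sorted2_perm ..).mem_iff).1 hp
  have hmemT' : ∀ p ∈ tagged, p ∈ sortedT := fun p hp =>
    ((PySem.List.sorted2_perm ..).mem_iff).2 hp
  have htagged_mem : ∀ p ∈ tagged, (p.1 ∈ C ∧ p.2 = 0) ∨ (p.1 ∈ I ∧ p.2 = 0)
      ∨ (p.1 ∈ M ∧ p.2 = 1) ∨ (p.1 ∈ L ∧ p.2 = 2) := by
    intro p hp
    simp only [htag, List.mem_append, List.mem_map] at hp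
    rcases hp with ((⟨x, hx, rfl⟩ | ⟨x, hx, rfl⟩) | ⟨x, hx, rfl⟩) | ⟨x, hx, rfl⟩ <;> simp [hx]
  -- lower bound: every tagged cost is at least the priority cost
  have hlb : ∀ p ∈ sortedT, prioC C I M p.1 ≤ p.2 := by
    intro p hp
    rcases htagged_mem p (hmemT p hp) with ⟨h, hc⟩ | ⟨h, hc⟩ | ⟨h, hc⟩ | ⟨h, hc⟩ <;>
      simp only [prioC] <;> split_ifs <;> omega
  -- every value occurring in sortedT also occurs tagged with its priority cost
  have hmin : ∀ p ∈ sortedT, (p.1, prioC C I M p.1) ∈ sortedT := by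
    intro p hp
    have hcov := htagged_mem p (hmemT p hp)
    apply hmemT'
    rw [htag]
    simp only [prioC]
    split_ifs with h1 h2 h3
    · exact List.mem_append_left _ (List.mem_append_left _ (List.mem_append_left _
        (List.mem_map_of_mem h1)))
    · exact List.mem_append_left _ (List.mem_append_left _ (List.mem_append_right _
        (List.mem_map_of_mem h2)))
    · exact List.mem_append_left _ (List.mem_append_right _ (List.mem_map_of_mem h3))
    · have hL' : p.1 ∈ L := by tauto
      exact List.mem_append_right _ (List.mem_map_of_mem hL')
  -- B's fold result
  have hB : (sortedT.foldl (fun (st : Option (Int × Int) × List (Int × Int)) p =>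
      let r : Int × Int := match st.1 with
        | some (rv, rc) => if p.1 ≠ rv then (p.1, p.2) else (rv, rc)
        | none => (p.1, p.2)
      (some r, st.2 ++ [(p.1, r.2)])) (none, [])).2
      = sortedT.map (fun p => (p.1, prioC C I M p.1)) := by
    have := foldB (prioC C I M) sortedT none [] (sorted2_lex_pairwise tagged)
      hlb (fun p hp _ => hmin p hp) (fun _ _ h => by cases h) (fun _ _ _ _ h => by cases h)
    simpa using this
  rw [hB]
  -- A's fold result
  set sortedV := PySem.List.sorted vals (fun x => x) false with hsV
  have hcov : ∀ x ∈ sortedV, x ∈ C ∨ x ∈ I ∨ x ∈ M ∨ x ∈ L := by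
    intro x hx
    have := (PySem.List.mem_sorted vals (fun x => x) false x).1 hx
    simpa [hvals, List.mem_append, or_assoc] using this
  rw [foldA C I M L sortedV [] hcov]
  simp only [List.nil_append]
  -- it remains: sortedV.map (fun v => (v, prio v)) = sortedT.map (fun p => (p.1, prio p.1))
  have hfst : sortedT.map Prod.fst = sortedV := by
    apply PySem.List.eq_of_perm_of_pairwise_le_of_injective (fun x : Int => x)
      (fun a b h => h)
    · -- permutation
      have h1 : (sortedT.map Prod.fst).Perm (tagged.map Prod.fst) :=
        (PySem.List.sorted2_perm ..).map Prod.fst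
      have h2 : tagged.map Prod.fst = vals := by
        simp [htag, hvals, Function.comp_def]
      have h3 : sortedV.Perm vals := PySem.List.sorted_perm ..
      exact (h2 ▸ h1).trans h3.symm
    · -- sortedT.map fst is ≤-pairwise
      exact List.Pairwise.map _ (fun {a b} h => by
        rcases h with h | ⟨h, _⟩ <;> omega) (sorted2_lex_pairwise tagged)
    · exact PySem.List.sorted_pairwise vals (fun x => x)
  calc sortedV.map (fun v => (v, prioC C I M v))
      = (sortedT.map Prod.fst).map (fun v => (v, prioC C I M v)) := by rw [hfst]
    _ = sortedT.map (fun p => (p.1, prioC C I M p.1)) := by rw [List.map_map]; rfl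

-- ===== VERDICT (by name: the statement is the Claim_ definition above) =====
theorem get_cost_array_spec : Claim_equal_get_cost_array := by
  intro text c i m _
  unfold Spec_get_cost_array
  exact get_cost_array_spec_aux text c i m
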